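-- pv_equiv track=rewrite | github.com/PTSVU/VUZ | sem-4/python/pract2/5.py | lev_dist_ops
-- ===== SOURCE A (Python) =====
-- def lev_dist_ops(a, b):
--     dp = [[0] * (len(b) + 1) for _ in range(len(a) + 1)]
--     ops = [[''] * (len(b) + 1) for _ in range(len(a) + 1)]
--
--     for i in range(len(a) + 1):
--         dp[i][0] = i
--         ops[i][0] = 'удаление' * i
--     for j in range(len(b) + 1):
--         dp[0][j] = j
--         ops[0][j] = 'вставка' * j
--
--     for i in range(1, len(a) + 1):
--         for j in range(1, len(b) + 1):
--             cost = 0 if a[i - 1] == b[j - 1] else 1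
--             insert_cost = dp[i][j - 1] + 1
--             delete_cost = dp[i - 1][j] + 1
--             replace_cost = dp[i - 1][j - 1] + cost
--             min_cost = min(insert_cost, delete_cost, replace_cost)
--             dp[i][j] = min_cost
--             if min_cost == replace_cost:
--                 if cost == 1:
--                     ops[i][j] = 'замена'
--                 else:
--                     ops[i][j] = 'равно'
--             elif min_cost == insert_cost:
--                 ops[i][j] = 'вставка'
--             else:
--                 ops[i][j] = 'удаление'
--
--     return [ops[i][j] for i, j in zip(range(1, len(a) + 1), [len(b)] * len(a))]
-- ===== SOURCE B (Python) =====
-- def lev_dist_ops(a, b):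
--     n, m = len(a), len(b)
--     if m == 0:
--         return ['удаление' * i for i in range(1, n + 1)]
--     # Phase 1: numeric Levenshtein DP with rolling rows, keeping only the
--     # last two cells (dp[i][m-1], dp[i][m]) of every row.
--     prev = list(range(m + 1))
--     lasts = [(prev[m - 1], prev[m])]
--     for i in range(1, n + 1):
--         cur = [i]
--         for j in range(1, m + 1):
--             cost = 0 if a[i - 1] == b[j - 1] else 1
--             cur.append(min(min(cur[j - 1] + 1, prev[j] + 1), prev[j - 1] + cost))
--         lasts.append((cur[m - 1], cur[m]))
--         prev = cur
--     # Phase 2: derive the last-column operation labels from the stored cells.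
--     res = []
--     for i in range(1, n + 1):
--         cost = 0 if a[i - 1] == b[m - 1] else 1
--         ins = lasts[i][0] + 1
--         dele = lasts[i - 1][1] + 1
--         rep = lasts[i - 1][0] + cost
--         mc = min(min(ins, dele), rep)
--         if mc == rep:
--             res.append('замена' if cost == 1 else 'равно')
--         elif mc == ins:
--             res.append('вставка')
--         else:
--             res.append('удаление')
--     return res
-- ===== Notes on version B (the rewrite author's own statement) =====
-- stated objective: alternative
-- what changed: B replaces A's full (n+1)x(m+1) ops-label matrix with a rolling two-row numeric Levenshtein DP that stores only the last two cells of each row, then a separate second pass recomputes the last-column labels from those cells with A's tie-break (empty b handled directly as repeated deletions).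
import Mathlib
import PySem

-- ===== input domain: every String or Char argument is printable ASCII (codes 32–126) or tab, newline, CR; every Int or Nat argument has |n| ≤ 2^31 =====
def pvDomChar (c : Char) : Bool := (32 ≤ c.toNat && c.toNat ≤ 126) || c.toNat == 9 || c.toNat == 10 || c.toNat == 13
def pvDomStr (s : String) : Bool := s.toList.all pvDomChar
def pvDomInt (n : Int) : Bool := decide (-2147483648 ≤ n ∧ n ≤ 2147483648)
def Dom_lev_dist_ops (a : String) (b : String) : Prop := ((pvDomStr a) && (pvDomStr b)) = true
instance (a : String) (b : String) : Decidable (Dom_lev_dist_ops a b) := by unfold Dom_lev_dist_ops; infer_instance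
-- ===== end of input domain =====

-- B separates the numeric Levenshtein DP (rolling rows, last two cells kept) from a second
-- pass deriving the last-column labels; A fills a full label matrix alongside the DP matrix.

-- 'удаление' * i  (Python string repetition)
def pvRep (s : String) (k : Nat) : String := String.join (List.replicate k s)

-- ===== PORT A =====
-- dp[i][j] / ops[i][j] reads and writes (all indices are in range, so getD/set are exact)
def pvGet2 (dp : List (List Nat)) (i j : Nat) : Nat := (dp.getD i []).getD j 0
def pvSet2 (dp : List (List Nat)) (i j : Nat) (v : Nat) : List (List Nat) :=
  dp.set i ((dp.getD i []).set j v)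
def pvGet2S (ops : List (List String)) (i j : Nat) : String := (ops.getD i []).getD j ""
def pvSet2S (ops : List (List String)) (i j : Nat) (v : String) : List (List String) :=
  ops.set i ((ops.getD i []).set j v)

def lev_dist_ops (a : String) (b : String) : List String :=
  let al := a.toList
  let bl := b.toList
  let n := al.length
  let m := bl.length
  let dp0 : List (List Nat) := List.replicate (n+1) (List.replicate (m+1) 0)
  let ops0 : List (List String) := List.replicate (n+1) (List.replicate (m+1) "")
  let st1 := (List.range' 0 (n+1)).foldl
    (fun (st : List (List Nat) × List (List String)) i =>
      (pvSet2 st.1 i 0 i, pvSet2S st.2 i 0 (pvRep "удаление" i))) (dp0, ops0)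
  let st2 := (List.range' 0 (m+1)).foldl
    (fun (st : List (List Nat) × List (List String)) j =>
      (pvSet2 st.1 0 j j, pvSet2S st.2 0 j (pvRep "вставка" j))) st1
  let st3 := (List.range' 1 n).foldl
    (fun (st : List (List Nat) × List (List String)) i =>
      (List.range' 1 m).foldl
        (fun (st : List (List Nat) × List (List String)) j =>
          let cost : Nat := if al.getD (i-1) ' ' = bl.getD (j-1) ' ' then 0 else 1
          let insert_cost := pvGet2 st.1 i (j-1) + 1
          let delete_cost := pvGet2 st.1 (i-1) j + 1
          let replace_cost := pvGet2 st.1 (i-1) (j-1) + cost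
          let min_cost := min (min insert_cost delete_cost) replace_cost
          (pvSet2 st.1 i j min_cost,
           if min_cost = replace_cost then
             pvSet2S st.2 i j (if cost = 1 then "замена" else "равно")
           else if min_cost = insert_cost then
             pvSet2S st.2 i j "вставка"
           else
             pvSet2S st.2 i j "удаление")) st) st2
  (List.range' 1 n).map (fun i => pvGet2S st3.2 i m)

-- ===== PORT B =====
def lev_dist_ops_alt (a : String) (b : String) : List String :=
  let al := a.toList
  let bl := b.toList
  let n := al.length
  let m := bl.length
  if m = 0 then
    (List.range' 1 n).map (fun i => pvRep "удаление" i)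
  else
    -- phase 1: rolling-row numeric DP, keeping (dp[i][m-1], dp[i][m]) per row
    let prev0 : List Nat := List.range (m+1)
    let lasts := ((List.range' 1 n).foldl
      (fun (st : List (Nat × Nat) × List Nat) i =>
        let cur := (List.range' 1 m).foldl
          (fun (cur : List Nat) j =>
            let cost : Nat := if al.getD (i-1) ' ' = bl.getD (j-1) ' ' then 0 else 1
            cur ++ [min (min (cur.getD (j-1) 0 + 1) (st.2.getD j 0 + 1)) (st.2.getD (j-1) 0 + cost)])
          [i]
        (st.1 ++ [(cur.getD (m-1) 0, cur.getD m 0)], cur))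
      ([(prev0.getD (m-1) 0, prev0.getD m 0)], prev0)).1
    -- phase 2: derive the last-column labels
    (List.range' 1 n).map (fun i =>
      let cost : Nat := if al.getD (i-1) ' ' = bl.getD (m-1) ' ' then 0 else 1
      let ins := (lasts.getD i (0,0)).1 + 1
      let del := (lasts.getD (i-1) (0,0)).2 + 1
      let rep := (lasts.getD (i-1) (0,0)).1 + cost
      let mc := min (min ins del) rep
      if mc = rep then (if cost = 1 then "замена" else "равно")
      else if mc = ins then "вставка"
      else "удаление")

-- ===== PRECONDITION & SPEC =====
def Spec_lev_dist_ops (a : String) (b : String) (out : List String) : Prop := out = lev_dist_ops_alt a b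
instance (a : String) (b : String) (out : List String) : Decidable (Spec_lev_dist_ops a b out) := by unfold Spec_lev_dist_ops; infer_instance

-- ===== CLAIM (what is proved, stated in full; the proofs are below) =====
def Claim_equal_lev_dist_ops : Prop := ∀ (a : String) (b : String), Dom_lev_dist_ops a b → Spec_lev_dist_ops a b (lev_dist_ops a b)

-- ===== LEMMAS AND PROOFS =====

-- generic getD/set/range helpers
theorem pvGetD_set {α} (l : List α) (i r : Nat) (v d : α) :
    (l.set i v).getD r d = if i = r ∧ i < l.length then v else l.getD r d := by
  simp [List.getD_eq_getElem?_getD, List.getElem?_set]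
  split_ifs with h1 h2 h3 <;> simp_all
  omega

theorem mapRange_getD {α} (f : Nat → α) (n j : Nat) (d : α) :
    ((List.range n).map f).getD j d = if j < n then f j else d := by
  simp [List.getD_eq_getElem?_getD]
  split_ifs <;> simp_all

theorem rangeN_getD (n j d : Nat) : (List.range n).getD j d = if j < n then j else d := by
  simp [List.getD_eq_getElem?_getD]
  split_ifs <;> simp_all

theorem range'_snoc (s k : Nat) : List.range' s (k+1) = List.range' s k ++ [s + k] := by
  simpa using (List.range'_concat (s := s) (n := k) (step := 1))

-- the mathematical Levenshtein DP value dp[i][j]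
def levN (al bl : List Char) : Nat → Nat → Nat
  | 0, j => j
  | i+1, 0 => i+1
  | i+1, j+1 =>
    let cost : Nat := if al.getD i ' ' = bl.getD j ' ' then 0 else 1
    min (min (levN al bl (i+1) j + 1) (levN al bl i (j+1) + 1)) (levN al bl i j + cost)
  termination_by i j => (i, j)

theorem levN_zero (al bl : List Char) (j : Nat) : levN al bl 0 j = j := by
  cases j <;> simp [levN]

theorem levN_izero (al bl : List Char) (i : Nat) : levN al bl i 0 = i := by
  cases i <;> simp [levN]

theorem levN_succ (al bl : List Char) (i j : Nat) :
    levN al bl (i+1) (j+1) =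
      min (min (levN al bl (i+1) j + 1) (levN al bl i (j+1) + 1))
        (levN al bl i j + (if al.getD i ' ' = bl.getD j ' ' then 0 else 1)) := by
  rw [levN]

-- the label both programs attach to cell (i, j), for 1 ≤ i, 1 ≤ j
def opLab (al bl : List Char) (i j : Nat) : String :=
  let cost : Nat := if al.getD (i-1) ' ' = bl.getD (j-1) ' ' then 0 else 1
  let ins := levN al bl i (j-1) + 1
  let del := levN al bl (i-1) j + 1
  let rep := levN al bl (i-1) (j-1) + cost
  let mc := min (min ins del) rep
  if mc = rep then (if cost = 1 then "замена" else "равно")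
  else if mc = ins then "вставка"
  else "удаление"

-- ---------- named copies of A's loop bodies (definitionally the port's lambdas) ----------
abbrev StA : Type := List (List Nat) × List (List String)

def initRowA (st : StA) (i : Nat) : StA :=
  (pvSet2 st.1 i 0 i, pvSet2S st.2 i 0 (pvRep "удаление" i))

def initColA (st : StA) (j : Nat) : StA :=
  (pvSet2 st.1 0 j j, pvSet2S st.2 0 j (pvRep "вставка" j))

def cellA (al bl : List Char) (i : Nat) (st : StA) (j : Nat) : StA :=
  let cost : Nat := if al.getD (i-1) ' ' = bl.getD (j-1) ' ' then 0 else 1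
  let insert_cost := pvGet2 st.1 i (j-1) + 1
  let delete_cost := pvGet2 st.1 (i-1) j + 1
  let replace_cost := pvGet2 st.1 (i-1) (j-1) + cost
  let min_cost := min (min insert_cost delete_cost) replace_cost
  (pvSet2 st.1 i j min_cost,
   if min_cost = replace_cost then
     pvSet2S st.2 i j (if cost = 1 then "замена" else "равно")
   else if min_cost = insert_cost then
     pvSet2S st.2 i j "вставка"
   else
     pvSet2S st.2 i j "удаление")

def rowA (al bl : List Char) (m : Nat) (st : StA) (i : Nat) : StA :=
  (List.range' 1 m).foldl (cellA al bl i) st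

def initA (n m : Nat) : StA :=
  (List.range' 0 (m+1)).foldl initColA
    ((List.range' 0 (n+1)).foldl initRowA
      (List.replicate (n+1) (List.replicate (m+1) 0),
       List.replicate (n+1) (List.replicate (m+1) "")))

theorem levA_eq (a b : String) :
    lev_dist_ops a b =
      (List.range' 1 a.toList.length).map (fun i =>
        pvGet2S (((List.range' 1 a.toList.length).foldl
            (rowA a.toList b.toList b.toList.length)
            (initA a.toList.length b.toList.length)).2) i b.toList.length) := rfl

-- ---------- named copies of B's loop bodies ----------
def cellB (al bl : List Char) (i : Nat) (prev : List Nat) (cur : List Nat) (j : Nat) : List Nat :=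
  let cost : Nat := if al.getD (i-1) ' ' = bl.getD (j-1) ' ' then 0 else 1
  cur ++ [min (min (cur.getD (j-1) 0 + 1) (prev.getD j 0 + 1)) (prev.getD (j-1) 0 + cost)]

def rowB (al bl : List Char) (m : Nat) (st : List (Nat × Nat) × List Nat) (i : Nat) :
    List (Nat × Nat) × List Nat :=
  let cur := (List.range' 1 m).foldl (cellB al bl i st.2) [i]
  (st.1 ++ [(cur.getD (m-1) 0, cur.getD m 0)], cur)

def labB (al bl : List Char) (m : Nat) (lasts : List (Nat × Nat)) (i : Nat) : String :=
  let cost : Nat := if al.getD (i-1) ' ' = bl.getD (m-1) ' ' then 0 else 1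
  let ins := (lasts.getD i (0,0)).1 + 1
  let del := (lasts.getD (i-1) (0,0)).2 + 1
  let rep := (lasts.getD (i-1) (0,0)).1 + cost
  let mc := min (min ins del) rep
  if mc = rep then (if cost = 1 then "замена" else "равно")
  else if mc = ins then "вставка"
  else "удаление"

theorem levB_eq (a b : String) :
    lev_dist_ops_alt a b =
      (if b.toList.length = 0 then
        (List.range' 1 a.toList.length).map (fun i => pvRep "удаление" i)
      else
        (List.range' 1 a.toList.length).map
          (labB a.toList b.toList b.toList.length
            (((List.range' 1 a.toList.length).foldl (rowB a.toList b.toList b.toList.length)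
              ([((List.range (b.toList.length+1)).getD (b.toList.length-1) 0,
                 (List.range (b.toList.length+1)).getD b.toList.length 0)],
               List.range (b.toList.length+1))).1))) := rfl

-- ---------- B-side characterisation ----------
theorem cellB_fold (al bl : List Char) (i : Nat) (hi : 1 ≤ i) (prev : List Nat) :
    ∀ (k : Nat), (∀ j, j ≤ k → prev.getD j 0 = levN al bl (i-1) j) →
      (List.range' 1 k).foldl (cellB al bl i prev) [i]
        = (List.range (k+1)).map (levN al bl i) := by
  intro k
  induction k with
  | zero =>
    intro _
    simp [List.range_one, levN_izero]
  | succ k ih =>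
    intro hp
    obtain ⟨i', rfl⟩ : ∃ i', i = i' + 1 := ⟨i - 1, by omega⟩
    simp only [Nat.add_sub_cancel] at hp
    rw [range'_snoc, List.foldl_append, ih (fun j hj => hp j (by omega))]
    have h1k : 1 + k = k + 1 := by omega
    rw [h1k]
    conv_rhs => rw [List.range_succ]
    rw [List.map_append]
    simp only [List.foldl_cons, List.foldl_nil, cellB, Nat.add_sub_cancel, List.map_cons,
      List.map_nil]
    congr 1
    rw [mapRange_getD, if_pos (by omega), hp (k+1) (le_refl _), hp k (by omega), levN_succ]

theorem rowB_fold (al bl : List Char) (m : Nat) (hm : 1 ≤ m) :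
    ∀ (k : Nat),
      (List.range' 1 k).foldl (rowB al bl m)
          ([((List.range (m+1)).getD (m-1) 0, (List.range (m+1)).getD m 0)], List.range (m+1))
        = ((List.range (k+1)).map (fun i => (levN al bl i (m-1), levN al bl i m)),
           (List.range (m+1)).map (levN al bl k)) := by
  intro k
  induction k with
  | zero =>
    rw [rangeN_getD, rangeN_getD, if_pos (by omega), if_pos (by omega)]
    have hmap : List.map (levN al bl 0) (List.range (m+1)) = List.map id (List.range (m+1)) :=
      List.map_congr_left (fun x _ => levN_zero al bl x)
    simp [levN_zero]
    rw [hmap, List.map_id]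
  | succ k ih =>
    rw [range'_snoc, List.foldl_append, ih]
    have h1k : 1 + k = k + 1 := by omega
    rw [h1k]
    simp only [List.foldl_cons, List.foldl_nil, rowB]
    rw [cellB_fold al bl (k+1) (by omega) _ m
      (by intro j hj; simp only [Nat.add_sub_cancel]; rw [mapRange_getD, if_pos (by omega)])]
    conv_rhs => rw [List.range_succ]
    rw [List.map_append]
    rw [mapRange_getD, if_pos (by omega), mapRange_getD, if_pos (by omega)]
    simp

theorem B_char (a b : String) (hm : 1 ≤ b.toList.length) :
    lev_dist_ops_alt a b
      = (List.range' 1 a.toList.length).map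
          (fun i => opLab a.toList b.toList i b.toList.length) := by
  rw [levB_eq, if_neg (by omega)]
  rw [rowB_fold a.toList b.toList b.toList.length hm a.toList.length]
  apply List.map_congr_left
  intro i hi
  rw [List.mem_range'_1] at hi
  have hi1 : i < a.toList.length + 1 := by omega
  have hi2 : i - 1 < a.toList.length + 1 := by omega
  simp only [labB, opLab, mapRange_getD, hi1, hi2, if_true]

-- ---------- A-side: initialisation characterisation ----------
theorem getD_of_len_le {α} (l : List α) (i : Nat) (d : α) (h : l.length ≤ i) : l.getD i d = d := by
  simp [List.getD_eq_getElem?_getD, List.getElem?_eq_none (by omega : l.length ≤ i)]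

theorem initRowA_dp_getD (st : StA) (s r : Nat) :
    (initRowA st s).1.getD r [] = if r = s then (st.1.getD s []).set 0 s else st.1.getD r [] := by
  simp only [initRowA, pvSet2, pvSet2S, pvGetD_set]
  by_cases h3 : r = s
  · subst h3
    rw [if_pos rfl]
    by_cases h : r < st.1.length
    · rw [if_pos ⟨rfl, h⟩]
    · rw [if_neg (by tauto)]
      have e : st.1.getD r ([] : _) = [] := getD_of_len_le _ _ _ (by omega)
      rw [e]
      rfl
  · rw [if_neg h3, if_neg (by rintro ⟨h4, -⟩; exact h3 h4.symm)]

theorem initRowA_ops_getD (st : StA) (s r : Nat) :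
    (initRowA st s).2.getD r [] = if r = s then (st.2.getD s []).set 0 (pvRep "удаление" s) else st.2.getD r [] := by
  simp only [initRowA, pvSet2, pvSet2S, pvGetD_set]
  by_cases h3 : r = s
  · subst h3
    rw [if_pos rfl]
    by_cases h : r < st.2.length
    · rw [if_pos ⟨rfl, h⟩]
    · rw [if_neg (by tauto)]
      have e : st.2.getD r ([] : _) = [] := getD_of_len_le _ _ _ (by omega)
      rw [e]
      rfl
  · rw [if_neg h3, if_neg (by rintro ⟨h4, -⟩; exact h3 h4.symm)]

theorem initColA_dp_getD (st : StA) (j r : Nat) :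
    (initColA st j).1.getD r [] = if r = 0 then (st.1.getD 0 []).set j j else st.1.getD r [] := by
  simp only [initColA, pvSet2, pvGetD_set]
  by_cases h3 : r = 0
  · subst h3
    rw [if_pos rfl]
    by_cases h : 0 < st.1.length
    · rw [if_pos ⟨rfl, h⟩]
    · rw [if_neg (by tauto)]
      have e : st.1.getD 0 ([] : _) = [] := getD_of_len_le _ _ _ (by omega)
      rw [e]
      rfl
  · rw [if_neg h3, if_neg (by rintro ⟨h4, -⟩; exact h3 h4.symm)]

theorem initColA_ops_getD (st : StA) (j r : Nat) :
    (initColA st j).2.getD r []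
      = if r = 0 then (st.2.getD 0 []).set j (pvRep "вставка" j) else st.2.getD r [] := by
  simp only [initColA, pvSet2S, pvGetD_set]
  by_cases h3 : r = 0
  · subst h3
    rw [if_pos rfl]
    by_cases h : 0 < st.2.length
    · rw [if_pos ⟨rfl, h⟩]
    · rw [if_neg (by tauto)]
      have e : st.2.getD 0 ([] : _) = [] := getD_of_len_le _ _ _ (by omega)
      rw [e]
      rfl
  · rw [if_neg h3, if_neg (by rintro ⟨h4, -⟩; exact h3 h4.symm)]

theorem initRowA_fold_dp (k : Nat) :
    ∀ (s : Nat) (st : StA) (r : Nat),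
      ((List.range' s k).foldl initRowA st).1.getD r []
        = if s ≤ r ∧ r < s + k then (st.1.getD r []).set 0 r else st.1.getD r [] := by
  induction k with
  | zero => intro s st r; simp
  | succ k ih =>
    intro s st r
    rw [List.range'_succ, List.foldl_cons, ih, initRowA_dp_getD]
    split_ifs <;> (try subst_vars) <;> first | rfl | omega

theorem initRowA_fold_ops (k : Nat) :
    ∀ (s : Nat) (st : StA) (r : Nat),
      ((List.range' s k).foldl initRowA st).2.getD r []
        = if s ≤ r ∧ r < s + k then (st.2.getD r []).set 0 (pvRep "удаление" r)
          else st.2.getD r [] := by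
  induction k with
  | zero => intro s st r; simp
  | succ k ih =>
    intro s st r
    rw [List.range'_succ, List.foldl_cons, ih, initRowA_ops_getD]
    split_ifs <;> (try subst_vars) <;> first | rfl | omega

theorem initColA_fold_dp_ne (k : Nat) :
    ∀ (s : Nat) (st : StA) (r : Nat), r ≠ 0 →
      ((List.range' s k).foldl initColA st).1.getD r [] = st.1.getD r [] := by
  induction k with
  | zero => intro s st r _; simp
  | succ k ih =>
    intro s st r hr
    rw [List.range'_succ, List.foldl_cons, ih _ _ _ hr, initColA_dp_getD, if_neg hr]

theorem initColA_fold_ops_ne (k : Nat) :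
    ∀ (s : Nat) (st : StA) (r : Nat), r ≠ 0 →
      ((List.range' s k).foldl initColA st).2.getD r [] = st.2.getD r [] := by
  induction k with
  | zero => intro s st r _; simp
  | succ k ih =>
    intro s st r hr
    rw [List.range'_succ, List.foldl_cons, ih _ _ _ hr, initColA_ops_getD, if_neg hr]

theorem initColA_fold_row0 (k : Nat) :
    ∀ (s : Nat) (st : StA),
      ((List.range' s k).foldl initColA st).1.getD 0 []
        = (List.range' s k).foldl (fun (row : List Nat) j => row.set j j) (st.1.getD 0 []) := by
  induction k with
  | zero => intro s st; simp
  | succ k ih =>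
    intro s st
    rw [List.range'_succ, List.foldl_cons, List.foldl_cons, ih]
    congr 1
    rw [initColA_dp_getD, if_pos rfl]

theorem set_seq (k : Nat) :
    ∀ (s : Nat) (row : List Nat) (c : Nat),
      ((List.range' s k).foldl (fun (row : List Nat) j => row.set j j) row).getD c 0
        = if s ≤ c ∧ c < s + k ∧ c < row.length then c else row.getD c 0 := by
  induction k with
  | zero =>
    intro s row c
    rw [if_neg (by omega)]
    simp
  | succ k ih =>
    intro s row c
    rw [List.range'_succ, List.foldl_cons, ih, List.length_set, pvGetD_set]
    split_ifs <;> first | rfl | omega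

theorem set_seq_len (k : Nat) :
    ∀ (s : Nat) (row : List Nat),
      ((List.range' s k).foldl (fun (row : List Nat) j => row.set j j) row).length
        = row.length := by
  induction k with
  | zero => intro s row; simp
  | succ k ih =>
    intro s row
    rw [List.range'_succ, List.foldl_cons, ih, List.length_set]

theorem initColA_fold_len1 (k : Nat) :
    ∀ (s : Nat) (st : StA), ((List.range' s k).foldl initColA st).1.length = st.1.length := by
  induction k with
  | zero => intro s st; simp
  | succ k ih =>
    intro s st
    rw [List.range'_succ, List.foldl_cons, ih]
    simp [initColA, pvSet2, pvSet2S]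

theorem initColA_fold_len2 (k : Nat) :
    ∀ (s : Nat) (st : StA), ((List.range' s k).foldl initColA st).2.length = st.2.length := by
  induction k with
  | zero => intro s st; simp
  | succ k ih =>
    intro s st
    rw [List.range'_succ, List.foldl_cons, ih]
    simp [initColA, pvSet2, pvSet2S]

theorem initRowA_fold_len1 (k : Nat) :
    ∀ (s : Nat) (st : StA), ((List.range' s k).foldl initRowA st).1.length = st.1.length := by
  induction k with
  | zero => intro s st; simp
  | succ k ih =>
    intro s st
    rw [List.range'_succ, List.foldl_cons, ih]
    simp [initRowA, pvSet2, pvSet2S]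

theorem initRowA_fold_len2 (k : Nat) :
    ∀ (s : Nat) (st : StA), ((List.range' s k).foldl initRowA st).2.length = st.2.length := by
  induction k with
  | zero => intro s st; simp
  | succ k ih =>
    intro s st
    rw [List.range'_succ, List.foldl_cons, ih]
    simp [initRowA, pvSet2, pvSet2S]

theorem initA_dp_len (n m : Nat) : (initA n m).1.length = n+1 := by
  unfold initA
  rw [initColA_fold_len1, initRowA_fold_len1]
  simp

theorem initA_ops_len (n m : Nat) : (initA n m).2.length = n+1 := by
  unfold initA
  rw [initColA_fold_len2, initRowA_fold_len2]
  simp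

theorem initA_dp_row (n m r : Nat) (h1 : 1 ≤ r) (hr : r ≤ n) :
    (initA n m).1.getD r [] = (List.replicate (m+1) 0).set 0 r := by
  unfold initA
  rw [initColA_fold_dp_ne _ _ _ _ (by omega), initRowA_fold_dp, if_pos ⟨by omega, by omega⟩]
  congr 1
  simp [Nat.lt_succ_of_le hr]

theorem initA_ops_row (n m r : Nat) (h1 : 1 ≤ r) (hr : r ≤ n) :
    (initA n m).2.getD r [] = (List.replicate (m+1) "").set 0 (pvRep "удаление" r) := by
  unfold initA
  rw [initColA_fold_ops_ne _ _ _ _ (by omega), initRowA_fold_ops, if_pos ⟨by omega, by omega⟩]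
  congr 1
  simp [Nat.lt_succ_of_le hr]

theorem initA_row_len (n m r : Nat) (hr : r ≤ n) : ((initA n m).1.getD r []).length = m+1 := by
  rcases Nat.eq_zero_or_pos r with h0 | h1
  · subst h0
    unfold initA
    rw [initColA_fold_row0, set_seq_len, initRowA_fold_dp, if_pos ⟨by omega, by omega⟩]
    simp
  · rw [initA_dp_row n m r h1 hr]
    simp

theorem initA_opsrow_len (n m r : Nat) (h1 : 1 ≤ r) (hr : r ≤ n) :
    ((initA n m).2.getD r []).length = m+1 := by
  rw [initA_ops_row n m r h1 hr]
  simp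

theorem initA_dp_row0 (n m c : Nat) (hc : c ≤ m) : ((initA n m).1.getD 0 []).getD c 0 = c := by
  unfold initA
  have hb : ((List.range' 0 (n+1)).foldl initRowA
      (List.replicate (n+1) (List.replicate (m+1) 0),
       List.replicate (n+1) (List.replicate (m+1) ""))).1.getD 0 []
      = (List.replicate (m+1) (0:Nat)).set 0 0 := by
    rw [initRowA_fold_dp, if_pos ⟨by omega, by omega⟩]
    simp
  rw [initColA_fold_row0, hb, set_seq, if_pos ⟨by omega, by omega, by simp; omega⟩]

theorem initA_dp_col0 (n m r : Nat) (h1 : 1 ≤ r) (hr : r ≤ n) :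
    ((initA n m).1.getD r []).getD 0 0 = r := by
  rw [initA_dp_row n m r h1 hr, pvGetD_set, if_pos ⟨rfl, by simp⟩]

theorem initA_ops_col0 (n m r : Nat) (h1 : 1 ≤ r) (hr : r ≤ n) :
    ((initA n m).2.getD r []).getD 0 "" = pvRep "удаление" r := by
  rw [initA_ops_row n m r h1 hr, pvGetD_set, if_pos ⟨rfl, by simp⟩]

-- ---------- A-side: the filling loops ----------
def cAmc (al bl : List Char) (i : Nat) (st : StA) (j : Nat) : Nat :=
  min (min (pvGet2 st.1 i (j-1) + 1) (pvGet2 st.1 (i-1) j + 1))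
    (pvGet2 st.1 (i-1) (j-1) + (if al.getD (i-1) ' ' = bl.getD (j-1) ' ' then 0 else 1))

def cALab (al bl : List Char) (i : Nat) (st : StA) (j : Nat) : String :=
  if cAmc al bl i st j
      = pvGet2 st.1 (i-1) (j-1) + (if al.getD (i-1) ' ' = bl.getD (j-1) ' ' then 0 else 1) then
    (if (if al.getD (i-1) ' ' = bl.getD (j-1) ' ' then 0 else 1) = 1 then "замена" else "равно")
  else if cAmc al bl i st j = pvGet2 st.1 i (j-1) + 1 then "вставка"
  else "удаление"

theorem cellA_eq (al bl : List Char) (i : Nat) (st : StA) (j : Nat) :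
    cellA al bl i st j
      = (pvSet2 st.1 i j (cAmc al bl i st j), pvSet2S st.2 i j (cALab al bl i st j)) := by
  simp only [cellA, cAmc, cALab]
  split_ifs <;> rfl

theorem cellA_fold (al bl : List Char) (i : Nat) (hi : 1 ≤ i) (k : Nat) :
    ∀ (st : StA),
      i < st.1.length → i < st.2.length →
      k < (st.1.getD i []).length → k < (st.2.getD i []).length →
      (∀ j, j ≤ k → (st.1.getD (i-1) []).getD j 0 = levN al bl (i-1) j) →
      (st.1.getD i []).getD 0 0 = i →
      (∀ r, r ≠ i → ((List.range' 1 k).foldl (cellA al bl i) st).1.getD r [] = st.1.getD r []) ∧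
      (∀ r, r ≠ i → ((List.range' 1 k).foldl (cellA al bl i) st).2.getD r [] = st.2.getD r []) ∧
      ((List.range' 1 k).foldl (cellA al bl i) st).1.length = st.1.length ∧
      ((List.range' 1 k).foldl (cellA al bl i) st).2.length = st.2.length ∧
      ((((List.range' 1 k).foldl (cellA al bl i) st).1.getD i []).length
        = (st.1.getD i []).length) ∧
      ((((List.range' 1 k).foldl (cellA al bl i) st).2.getD i []).length
        = (st.2.getD i []).length) ∧
      (∀ j, j ≤ k →
        ((((List.range' 1 k).foldl (cellA al bl i) st).1.getD i []).getD j 0 = levN al bl i j)) ∧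
      (∀ j, 1 ≤ j → j ≤ k →
        ((((List.range' 1 k).foldl (cellA al bl i) st).2.getD i []).getD j ""
          = opLab al bl i j)) := by
  induction k with
  | zero =>
    intro st hlen hlenS hrow hrowS hprev h0
    refine ⟨fun r _ => rfl, fun r _ => rfl, rfl, rfl, rfl, rfl, ?_, fun j h1j hj0 => by omega⟩
    intro j hj
    rw [Nat.le_zero] at hj
    subst hj
    rw [levN_izero]
    exact h0
  | succ k ih =>
    intro st hlen hlenS hrow hrowS hprev h0
    obtain ⟨u1, u2, l1, l2, rl1, rl2, dpv, opv⟩ :=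
      ih st hlen hlenS (by omega) (by omega) (fun j hj => hprev j (by omega)) h0
    have h1k : 1 + k = k + 1 := by omega
    rw [range'_snoc, List.foldl_append, h1k]
    simp only [List.foldl_cons, List.foldl_nil]
    rw [cellA_eq]
    obtain ⟨i', rfl⟩ : ∃ i', i = i' + 1 := ⟨i - 1, by omega⟩
    have e_ins : pvGet2 ((List.range' 1 k).foldl (cellA al bl (i'+1)) st).1 (i'+1) k
        = levN al bl (i'+1) k := dpv k (le_refl _)
    have e_del : pvGet2 ((List.range' 1 k).foldl (cellA al bl (i'+1)) st).1 ((i'+1)-1) (k+1)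
        = levN al bl i' (k+1) := by
      simp only [Nat.add_sub_cancel]
      show (((List.range' 1 k).foldl (cellA al bl (i'+1)) st).1.getD i' []).getD (k+1) 0 = _
      rw [u1 i' (by omega)]
      have := hprev (k+1) (le_refl _)
      simpa using this
    have e_rep : pvGet2 ((List.range' 1 k).foldl (cellA al bl (i'+1)) st).1 ((i'+1)-1) k
        = levN al bl i' k := by
      simp only [Nat.add_sub_cancel]
      show (((List.range' 1 k).foldl (cellA al bl (i'+1)) st).1.getD i' []).getD k 0 = _
      rw [u1 i' (by omega)]
      have := hprev k (by omega)
      simpa using this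
    have hmc : cAmc al bl (i'+1) ((List.range' 1 k).foldl (cellA al bl (i'+1)) st) (k+1)
        = levN al bl (i'+1) (k+1) := by
      unfold cAmc
      simp only [Nat.add_sub_cancel]
      simp only [Nat.add_sub_cancel] at e_ins e_del e_rep
      rw [e_ins, e_del, e_rep, levN_succ]
    have hlab : cALab al bl (i'+1) ((List.range' 1 k).foldl (cellA al bl (i'+1)) st) (k+1)
        = opLab al bl (i'+1) (k+1) := by
      unfold cALab cAmc opLab
      simp only [Nat.add_sub_cancel]
      simp only [Nat.add_sub_cancel] at e_ins e_del e_rep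
      rw [e_ins, e_del, e_rep]
    rw [hmc, hlab]
    simp only [pvSet2, pvSet2S]
    have hilen : i' + 1 < ((List.range' 1 k).foldl (cellA al bl (i'+1)) st).1.length := by omega
    have hilenS : i' + 1 < ((List.range' 1 k).foldl (cellA al bl (i'+1)) st).2.length := by omega
    refine ⟨?_, ?_, ?_, ?_, ?_, ?_, ?_, ?_⟩
    · intro r hr
      rw [pvGetD_set, if_neg (by tauto)]
      exact u1 r hr
    · intro r hr
      rw [pvGetD_set, if_neg (by tauto)]
      exact u2 r hr
    · rw [List.length_set]
      exact l1
    · rw [List.length_set]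
      exact l2
    · rw [pvGetD_set, if_pos ⟨rfl, hilen⟩, List.length_set]
      exact rl1
    · rw [pvGetD_set, if_pos ⟨rfl, hilenS⟩, List.length_set]
      exact rl2
    · intro j hj
      rw [pvGetD_set, if_pos ⟨rfl, hilen⟩, pvGetD_set]
      by_cases hjk : j = k + 1
      · subst hjk
        rw [if_pos ⟨rfl, by omega⟩]
      · rw [if_neg (by tauto)]
        exact dpv j (by omega)
    · intro j h1j hj
      rw [pvGetD_set, if_pos ⟨rfl, hilenS⟩, pvGetD_set]
      by_cases hjk : j = k + 1
      · subst hjk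
        rw [if_pos ⟨rfl, by omega⟩]
      · rw [if_neg (by tauto)]
        exact opv j h1j (by omega)

theorem rowA_fold (al bl : List Char) (n m : Nat) (hm : 1 ≤ m) (k : Nat) (hk : k ≤ n) :
    ((List.range' 1 k).foldl (rowA al bl m) (initA n m)).1.length = n+1 ∧
    ((List.range' 1 k).foldl (rowA al bl m) (initA n m)).2.length = n+1 ∧
    (∀ r, r ≤ n →
      ((((List.range' 1 k).foldl (rowA al bl m) (initA n m)).1.getD r []).length = m+1)) ∧
    (∀ r, 1 ≤ r → r ≤ n →
      ((((List.range' 1 k).foldl (rowA al bl m) (initA n m)).2.getD r []).length = m+1)) ∧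
    (∀ j, j ≤ m →
      ((((List.range' 1 k).foldl (rowA al bl m) (initA n m)).1.getD k []).getD j 0
        = levN al bl k j)) ∧
    (∀ r, k < r → r ≤ n →
      ((((List.range' 1 k).foldl (rowA al bl m) (initA n m)).1.getD r []).getD 0 0 = r)) ∧
    (∀ r, k < r → r ≤ n →
      (((List.range' 1 k).foldl (rowA al bl m) (initA n m)).2.getD r []
        = (initA n m).2.getD r [])) ∧
    (∀ i, 1 ≤ i → i ≤ k →
      ((((List.range' 1 k).foldl (rowA al bl m) (initA n m)).2.getD i []).getD m ""
        = opLab al bl i m)) := by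
  induction k with
  | zero =>
    refine ⟨initA_dp_len n m, initA_ops_len n m,
      fun r hr => initA_row_len n m r hr,
      fun r h1 hr => initA_opsrow_len n m r h1 hr,
      ?_,
      fun r h1 hr => initA_dp_col0 n m r (by omega) hr,
      fun r _ _ => rfl,
      fun i h1 hi => by omega⟩
    intro j hj
    rw [levN_zero]
    exact initA_dp_row0 n m j hj
  | succ k ih =>
    obtain ⟨L1, L2, RL1, RL2, DPV, C0, OU, LAB⟩ := ih (by omega)
    have h1k : 1 + k = k + 1 := by omega
    rw [range'_snoc, List.foldl_append, h1k]
    simp only [List.foldl_cons, List.foldl_nil, rowA]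
    obtain ⟨u1, u2, l1, l2, rl1, rl2, dpv, opv⟩ :=
      cellA_fold al bl (k+1) (by omega) m
        ((List.range' 1 k).foldl (rowA al bl m) (initA n m))
        (by omega) (by omega)
        (by rw [RL1 (k+1) hk]; omega)
        (by rw [RL2 (k+1) (by omega) hk]; omega)
        (by
          intro j hj
          simp only [Nat.add_sub_cancel]
          exact DPV j hj)
        (C0 (k+1) (by omega) hk)
    refine ⟨by omega, by omega, ?_, ?_, ?_, ?_, ?_, ?_⟩
    · intro r hr
      by_cases hrk : r = k + 1
      · subst hrk
        rw [rl1]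
        exact RL1 _ hr
      · rw [u1 r hrk]
        exact RL1 r hr
    · intro r h1 hr
      by_cases hrk : r = k + 1
      · subst hrk
        rw [rl2]
        exact RL2 _ h1 hr
      · rw [u2 r hrk]
        exact RL2 r h1 hr
    · intro j hj
      exact dpv j hj
    · intro r hr hrn
      rw [u1 r (by omega)]
      exact C0 r (by omega) hrn
    · intro r hr hrn
      rw [u2 r (by omega)]
      exact OU r (by omega) hrn
    · intro i h1 hik
      by_cases hikk : i = k + 1
      · subst hikk
        exact opv m hm (le_refl _)
      · rw [u2 i hikk]
        exact LAB i h1 (by omega)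

theorem A_char (a b : String) (hm : 1 ≤ b.toList.length) :
    lev_dist_ops a b
      = (List.range' 1 a.toList.length).map
          (fun i => opLab a.toList b.toList i b.toList.length) := by
  rw [levA_eq]
  apply List.map_congr_left
  intro i hi
  rw [List.mem_range'_1] at hi
  obtain ⟨_, _, _, _, _, _, _, LAB⟩ :=
    rowA_fold a.toList b.toList a.toList.length b.toList.length hm a.toList.length (le_refl _)
  simp only [pvGet2S]
  exact LAB i hi.1 (by omega)

theorem rowA_zero_foldl (al bl : List Char) (l : List Nat) (st : StA) :
    l.foldl (rowA al bl 0) st = st := by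
  induction l generalizing st with
  | nil => rfl
  | cons x t ih =>
    rw [List.foldl_cons]
    exact ih st

theorem main_eq (a b : String) : lev_dist_ops a b = lev_dist_ops_alt a b := by
  by_cases hm : b.toList.length = 0
  · rw [levA_eq, levB_eq, if_pos hm]
    apply List.map_congr_left
    intro i hi
    rw [List.mem_range'_1] at hi
    rw [hm, rowA_zero_foldl]
    simp only [pvGet2S]
    exact initA_ops_col0 a.toList.length 0 i hi.1 (by omega)
  · have hm' : 1 ≤ b.toList.length := by omega
    rw [A_char a b hm', B_char a b hm']


-- ===== VERDICT (by name: the statement is the Claim_ definition above) =====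
theorem lev_dist_ops_spec : Claim_equal_lev_dist_ops := by
  intro a b _
  unfold Spec_lev_dist_ops
  exact main_eq a b
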